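-- pv_equiv track=rewrite | github.com/binste/dbt-ibis | dbt_ibis/_jupyter.py | _remove_decorator
-- ===== SOURCE A (Python) =====
-- def _remove_decorator(ibis_expr_function_source_code: list[str]) -> list[str]:
--     cleaned_function_code = []
--     def_started = False
--     for line in ibis_expr_function_source_code:
--         if not def_started and not line.strip().startswith("def "):
--             continue
--         else:
--             def_started = True
--             cleaned_function_code.append(line)
--
--     return cleaned_function_code
-- ===== SOURCE B (Python) =====
-- def _remove_decorator(ibis_expr_function_source_code: list[str]) -> list[str]:
--     idx = next(
--         (
--             i
--             for i, line in enumerate(ibis_expr_function_source_code)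
--             if line.strip().startswith("def ")
--         ),
--         len(ibis_expr_function_source_code),
--     )
--     return ibis_expr_function_source_code[idx:]
-- ===== Notes on version B (the rewrite author's own statement) =====
-- stated objective: simpler
-- what changed: Replaces the flag-threaded accumulator loop with a find-first-def-index followed by a single slice of the input.
import Mathlib
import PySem

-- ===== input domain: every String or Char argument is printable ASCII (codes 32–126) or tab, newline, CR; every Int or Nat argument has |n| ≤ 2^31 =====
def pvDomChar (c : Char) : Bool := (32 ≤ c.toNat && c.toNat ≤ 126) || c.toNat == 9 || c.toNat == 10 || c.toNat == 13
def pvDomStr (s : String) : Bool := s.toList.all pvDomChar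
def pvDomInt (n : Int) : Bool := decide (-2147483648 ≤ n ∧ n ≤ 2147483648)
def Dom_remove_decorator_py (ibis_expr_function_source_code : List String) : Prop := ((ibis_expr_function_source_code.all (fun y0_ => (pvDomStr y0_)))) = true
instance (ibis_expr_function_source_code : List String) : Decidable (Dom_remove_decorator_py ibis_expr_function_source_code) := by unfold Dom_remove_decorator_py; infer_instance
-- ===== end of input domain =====

-- ===== PORT A =====
-- Header: B replaces A's flag-threaded accumulator loop with find-index-then-slice (objective: simpler).
def pvIsDefLine (line : String) : Bool :=
  PySem.Str.startswith (PySem.Str.strip line) "def "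

def remove_decorator_py (ibis_expr_function_source_code : List String) : List String :=
  (ibis_expr_function_source_code.foldl
    (fun (st : Bool × List String) line =>
      if !st.1 && !(pvIsDefLine line) then st
      else (true, st.2 ++ [line]))
    (false, [])).2

-- ===== PORT B =====
def remove_decorator_py_alt (ibis_expr_function_source_code : List String) : List String :=
  ibis_expr_function_source_code.drop
    (ibis_expr_function_source_code.findIdx pvIsDefLine)

-- ===== PRECONDITION & SPEC =====
def Spec_remove_decorator_py (ibis_expr_function_source_code : List String) (out : List String) : Prop := out = remove_decorator_py_alt ibis_expr_function_source_code
instance (ibis_expr_function_source_code : List String) (out : List String) : Decidable (Spec_remove_decorator_py ibis_expr_function_source_code out) := by unfold Spec_remove_decorator_py; infer_instance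

-- ===== CLAIM (what is proved, stated in full; the proofs are below) =====
def Claim_equal_remove_decorator_py : Prop := ∀ (ibis_expr_function_source_code : List String), Dom_remove_decorator_py ibis_expr_function_source_code → Spec_remove_decorator_py ibis_expr_function_source_code (remove_decorator_py ibis_expr_function_source_code)

-- ===== LEMMAS AND PROOFS =====

theorem pv_foldl_true (xs : List String) (acc : List String) :
    (xs.foldl
      (fun (st : Bool × List String) line =>
        if !st.1 && !(pvIsDefLine line) then st
        else (true, st.2 ++ [line]))
      (true, acc)).2 = acc ++ xs := by
  induction xs generalizing acc with
  | nil => simp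
  | cons x xs ih => simpa [List.foldl] using ih (acc ++ [x])

theorem pv_main (xs : List String) :
    (xs.foldl
      (fun (st : Bool × List String) line =>
        if !st.1 && !(pvIsDefLine line) then st
        else (true, st.2 ++ [line]))
      (false, [])).2 = xs.drop (xs.findIdx pvIsDefLine) := by
  induction xs with
  | nil => simp
  | cons x xs ih =>
    by_cases h : pvIsDefLine x
    · simpa [List.foldl, h, List.findIdx_cons] using pv_foldl_true xs [x]
    · simpa [List.foldl, h, List.findIdx_cons] using ih

-- ===== VERDICT (by name: the statement is the Claim_ definition above) =====
theorem remove_decorator_py_spec : Claim_equal_remove_decorator_py := by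
  intro src _
  show remove_decorator_py src = remove_decorator_py_alt src
  simpa [remove_decorator_py, remove_decorator_py_alt] using pv_main src
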